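-- pv_equiv track=rewrite | github.com/duythong244/Baitap04 | 5.5.py | normalize_expression
-- ===== SOURCE A (Python) =====
-- def normalize_expression(expr):
--     stack = []
--     result = ""
--
--     for char in expr:
--         if char == '(':
--             stack.append(result)
--             result = ""
--         elif char == ')':
--             if stack:
--                 result = stack.pop() + result
--         else:
--             result += char
--
--     return result
-- ===== SOURCE B (Python) =====
-- def normalize_expression(expr):
--     # Pass 1: stack of indices of unmatched '(' seen so far.
--     stack = []
--     for i, ch in enumerate(expr):
--         if ch == '(':
--             stack.append(i)
--         elif ch == ')':
--             if stack:
--                 stack.pop()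
--     # Everything before (and including) the last unmatched '(' is discarded.
--     cut = stack[-1] + 1 if stack else 0
--     # Pass 2: keep every non-parenthesis character of the tail.
--     return "".join(ch for ch in expr[cut:] if ch not in '()')
-- ===== Notes on version B (the rewrite author's own statement) =====
-- stated objective: alternative
-- what changed: Instead of maintaining a stack of partial result strings that is spliced on every closing parenthesis, B scans once with a stack of indices of unmatched opening parentheses to find the cut point after the last unmatched one, then filters all parentheses out of the tail and joins it.
import Mathlib
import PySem

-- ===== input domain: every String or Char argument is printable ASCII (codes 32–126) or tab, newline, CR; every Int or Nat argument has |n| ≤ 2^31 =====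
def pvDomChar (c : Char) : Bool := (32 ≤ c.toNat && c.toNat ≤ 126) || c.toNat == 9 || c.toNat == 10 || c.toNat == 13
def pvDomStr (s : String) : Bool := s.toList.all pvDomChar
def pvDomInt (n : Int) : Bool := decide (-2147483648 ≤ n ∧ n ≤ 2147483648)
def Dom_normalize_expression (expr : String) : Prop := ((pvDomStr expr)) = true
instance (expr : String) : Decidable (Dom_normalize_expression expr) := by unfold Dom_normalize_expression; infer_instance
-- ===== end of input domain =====

-- B replaces A's stack of partial result strings (spliced on each closing paren) by a one-pass
-- index stack locating the last unmatched opening paren, then a filter of the tail; same values.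

-- ===== PORT A =====
-- state = (stack of saved partial results, current result), both as lists of chars
def normAStep (acc : List (List Char) × List Char) (c : Char) : List (List Char) × List Char :=
  if c = '(' then (acc.2 :: acc.1, [])
  else if c = ')' then
    match acc.1 with
    | [] => acc
    | h :: t => (t, h ++ acc.2)
  else (acc.1, acc.2 ++ [c])

def normalize_expression (expr : String) : String :=
  String.mk (expr.toList.foldl normAStep ([], [])).2

-- ===== PORT B =====
-- pass 1 of Source B: stack of indices of unmatched '(' (head = python stack top)
def altPush (i : Nat) (c : Char) (s : List Nat) : List Nat :=
  if c = '(' then i :: s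
  else if c = ')' then
    match s with
    | [] => s
    | _ :: t => t
  else s

def altStack : List Char → Nat → List Nat → List Nat
  | [], _, s => s
  | c :: rest, i, s => altStack rest (i + 1) (altPush i c s)

def altKeep (c : Char) : Bool := c ≠ '(' && c ≠ ')'

def normalize_expression_alt (expr : String) : String :=
  let cs := expr.toList
  let cut : Nat :=
    match altStack cs 0 [] with
    | [] => 0
    | i :: _ => i + 1
  String.mk ((cs.drop cut).filter altKeep)

-- ===== PRECONDITION & SPEC =====
def Spec_normalize_expression (expr : String) (out : String) : Prop := out = normalize_expression_alt expr
instance (expr : String) (out : String) : Decidable (Spec_normalize_expression expr out) := by unfold Spec_normalize_expression; infer_instance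

-- ===== CLAIM (what is proved, stated in full; the proofs are below) =====
def Claim_equal_normalize_expression : Prop := ∀ (expr : String), Dom_normalize_expression expr → Spec_normalize_expression expr (normalize_expression expr)

-- ===== LEMMAS AND PROOFS =====

def pvFilt (l : List Char) : List Char := l.filter altKeep

-- Coupled invariant after processing prefix p: B's index stack `is` and A's state (st, res).
-- Top index i is the last unmatched '('; res is the filtered tail after it; stacked strings
-- are the filtered segments between successive unmatched '(' (stated recursively via take).
def pvInv : List Char → List Nat → List (List Char) → List Char → Prop
  | p, [], [], res => res = pvFilt p
  | p, i :: is, s :: ss, res =>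
      i < p.length ∧ p.getD i ' ' = '(' ∧ res = pvFilt (p.drop (i + 1)) ∧ pvInv (p.take i) is ss s
  | _, _ :: _, [], _ => False
  | _, [], _ :: _, _ => False

lemma pvFilt_append (a b : List Char) : pvFilt (a ++ b) = pvFilt a ++ pvFilt b := by
  simp [pvFilt, List.filter_append]

lemma pvFilt_split (p : List Char) (i : Nat) (hi : i < p.length) (hc : p.getD i ' ' = '(') :
    pvFilt p = pvFilt (p.take i) ++ pvFilt (p.drop (i + 1)) := by
  conv_lhs => rw [← List.take_append_drop i p]
  rw [List.drop_eq_getElem_cons hi, pvFilt_append]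
  have : p[i] = '(' := by
    have := hc
    simp [List.getD_eq_getElem?_getD, List.getElem?_eq_getElem hi] at this
    exact this
  simp [this, pvFilt, altKeep]

lemma pvInv_step (p : List Char) (is : List Nat) (st : List (List Char)) (res : List Char)
    (c : Char) (h : pvInv p is st res) :
    pvInv (p ++ [c]) (altPush p.length c is)
      ((normAStep (st, res) c).1) ((normAStep (st, res) c).2) := by
  by_cases h1 : c = '('
  · subst h1
    have e1 : altPush p.length '(' is = p.length :: is := by simp [altPush]
    have e2 : normAStep (st, res) '(' = (res :: st, []) := by simp [normAStep]
    rw [e1, e2]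
    refine ⟨by simp, by simp [List.getD_eq_getElem?_getD], ?_, ?_⟩
    · simp [pvFilt]
    · rw [List.take_left]
      exact h
  · by_cases h2 : c = ')'
    · subst h2
      match is, st with
      | [], [] =>
        have h' : res = pvFilt p := h
        have e1 : altPush p.length ')' [] = [] := by simp [altPush]
        have e2 : normAStep (([] : List (List Char)), res) ')' = ([], res) := by
          simp [normAStep]
        rw [e1, e2]
        show res = pvFilt (p ++ [')'])
        rw [pvFilt_append, h']
        simp [pvFilt, altKeep]
      | i :: is', s :: ss =>
        obtain ⟨hi, hc, hres, hinner⟩ := h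
        have e1 : altPush p.length ')' (i :: is') = is' := by simp [altPush]
        have e2 : normAStep ((s :: ss : List (List Char)), res) ')' = (ss, s ++ res) := by
          simp [normAStep]
        rw [e1, e2]
        have hpi : p[i] = '(' := by
          have := hc
          simp [List.getD_eq_getElem?_getD, List.getElem?_eq_getElem hi] at this
          exact this
        match is', ss with
        | [], [] =>
          have hs : s = pvFilt (p.take i) := hinner
          show s ++ res = pvFilt (p ++ [')'])
          rw [pvFilt_append, pvFilt_split p i hi hc, hs, hres]
          simp [pvFilt, altKeep]
        | j :: js, s' :: ss' =>
          obtain ⟨hj, hcj, hs, hinner2⟩ := hinner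
          have hilen : (p.take i).length = i := by simp [List.length_take]; omega
          have hji : j < i := by rw [hilen] at hj; exact hj
          refine ⟨by simp; omega, ?_, ?_, ?_⟩
          · rw [List.getD_eq_getElem?_getD, List.getElem?_append_left (by omega)]
            rw [List.getD_eq_getElem?_getD] at hcj
            rwa [List.getElem?_take_of_lt hji] at hcj
          · have hd : (p ++ [')']).drop (j + 1) = p.drop (j + 1) ++ [')'] :=
              List.drop_append_of_le_length (by omega)
            have hd2 : p.drop (j + 1) = (p.take i).drop (j + 1) ++ p.drop i := by
              conv_lhs => rw [← List.take_append_drop i p]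
              rw [List.drop_append_of_le_length (by simp; omega)]
            have hdi : p.drop i = p[i] :: p.drop (i + 1) := List.drop_eq_getElem_cons hi
            have hp1 : pvFilt ('(' :: p.drop (i + 1)) = pvFilt (p.drop (i + 1)) := by
              simp [pvFilt, altKeep]
            have hp2 : pvFilt [')'] = ([] : List Char) := by simp [pvFilt, altKeep]
            rw [hd, pvFilt_append, hd2, pvFilt_append, hdi, hpi, hp1, hp2, ← hs, ← hres]
            simp
          · rw [List.take_append_of_le_length (by omega)]
            rw [List.take_take] at hinner2
            rwa [min_eq_left (le_of_lt hji)] at hinner2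
        | [], _ :: _ => exact absurd hinner (by simp [pvInv])
        | _ :: _, [] => exact absurd hinner (by simp [pvInv])
      | [], _ :: _ => exact absurd h (by simp [pvInv])
      | _ :: _, [] => exact absurd h (by simp [pvInv])
    · have e1 : altPush p.length c is = is := by simp [altPush, h1, h2]
      have e2 : normAStep (st, res) c = (st, res ++ [c]) := by simp [normAStep, h1, h2]
      rw [e1, e2]
      match is, st with
      | [], [] =>
        have h' : res = pvFilt p := h
        show res ++ [c] = pvFilt (p ++ [c])
        rw [pvFilt_append, h']
        simp [pvFilt, altKeep, h1, h2]
      | i :: is', s :: ss =>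
        obtain ⟨hi, hc, hres, hinner⟩ := h
        refine ⟨by simp; omega, ?_, ?_, ?_⟩
        · rw [List.getD_eq_getElem?_getD, List.getElem?_append_left hi]
          rwa [List.getD_eq_getElem?_getD] at hc
        · rw [List.drop_append_of_le_length (by omega), pvFilt_append, ← hres]
          simp [pvFilt, altKeep, h1, h2]
        · rw [List.take_append_of_le_length (le_of_lt hi)]
          exact hinner
      | [], _ :: _ => exact absurd h (by simp [pvInv])
      | _ :: _, [] => exact absurd h (by simp [pvInv])

lemma pvInv_sim : ∀ (l p : List Char) (is : List Nat) (st : List (List Char)) (res : List Char),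
    pvInv p is st res →
    pvInv (p ++ l) (altStack l p.length is)
      ((l.foldl normAStep (st, res)).1) ((l.foldl normAStep (st, res)).2) := by
  intro l
  induction l with
  | nil => intro p is st res h; simpa using h
  | cons c rest ih =>
    intro p is st res h
    have hstep := pvInv_step p is st res c h
    have := ih (p ++ [c]) _ _ _ hstep
    simp only [List.length_append, List.length_cons, List.length_nil] at this
    simpa [altStack, List.foldl_cons, List.append_assoc] using this

-- ===== VERDICT (by name: the statement is the Claim_ definition above) =====
theorem normalize_expression_spec : Claim_equal_normalize_expression := by
  intro expr _
  unfold Spec_normalize_expression normalize_expression normalize_expression_alt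
  have h := pvInv_sim expr.toList [] [] [] [] (show pvInv [] [] [] [] from rfl)
  simp only [List.nil_append, List.length_nil] at h
  rcases hf : expr.toList.foldl normAStep ([], []) with ⟨st, res⟩
  rw [hf] at h
  cases hs : altStack expr.toList 0 [] with
  | nil =>
    rw [hs] at h
    match st, h with
    | [], h =>
      have h' : res = pvFilt expr.toList := h
      simp only [hs, h']
      simp [pvFilt]
    | _ :: _, h => exact h.elim
  | cons i is =>
    rw [hs] at h
    match st, h with
    | [], h => exact h.elim
    | s :: ss, h =>
      obtain ⟨_, _, hres, _⟩ := h
      simp only [hs]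
      exact congrArg String.mk hres
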